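-- pv_equiv track=rewrite | github.com/yiming1012/MyLeetCode | LeetCode/数学/LCP 22. 黑白方格画.py | paintingPlan
-- ===== SOURCE A (Python) =====
-- def paintingPlan(n: int, k: int) -> int:
--     """
--     思路：模拟
--         1. i和j分别表示行数和列数
--         2. 判断i行格子数+j列格子数-i*j个重复的格子数是否等于k
--         3. 如果i行j列满足条件，那么组合数为C(n,i)*C(n,j)
--         4. 可提前将阶层算好存到数组中，计算时直接取，不必重复递归求阶层
--     @param n:
--     @param k:
--     @return:
--     """
--
--     C = [[1] * (n + 1) for _ in range(n + 1)]
--     for i in range(1, n):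
--         for j in range(i):
--             C[i + 1][j + 1] = C[i][j] + C[i][j + 1]
--
--     res = 0
--     if k == n * n:
--         return 1
--     for i in range(n + 1):
--         for j in range(n + 1):
--             if i * n + j * n - i * j == k:
--                 res += C[n][i] * C[n][j]
--     return res
-- ===== SOURCE B (Python) =====
-- def paintingPlan(n: int, k: int) -> int:
--     # O(n): closed-form row-n binomials, and for each row count i solve the
--     # column count j directly from i*n + j*n - i*j == k.
--     if k == n * n:
--         return 1
--     C = [1]
--     for i in range(n):
--         C.append(C[-1] * (n - i) // (i + 1))
--     res = 0
--     for i in range(n):          # i == n needs k == n*n, handled above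
--         d = n - i               # d > 0
--         num = k - i * n
--         if num % d == 0:
--             j = num // d
--             if 0 <= j <= n:
--                 res += C[i] * C[j]
--     return res
-- ===== Notes on version B (the rewrite author's own statement) =====
-- stated objective: faster
-- what changed: B replaces A's O(n^2) Pascal-triangle table and O(n^2) double loop over all (i,j) pairs by an O(n) multiplicative computation of the row-n binomials and, for each row count i < n, solving the column count j directly from the linear equation i*n + j*n - i*j = k.
import Mathlib
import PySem

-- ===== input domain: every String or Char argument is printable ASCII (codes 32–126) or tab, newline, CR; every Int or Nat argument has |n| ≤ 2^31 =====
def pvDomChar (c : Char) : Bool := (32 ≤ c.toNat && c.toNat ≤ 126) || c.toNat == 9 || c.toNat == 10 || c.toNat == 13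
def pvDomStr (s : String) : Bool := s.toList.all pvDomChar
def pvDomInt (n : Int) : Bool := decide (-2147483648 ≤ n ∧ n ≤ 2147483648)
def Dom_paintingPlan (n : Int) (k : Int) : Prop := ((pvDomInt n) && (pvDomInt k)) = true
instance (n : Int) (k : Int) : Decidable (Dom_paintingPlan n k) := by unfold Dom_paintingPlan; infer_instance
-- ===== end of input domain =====

-- B replaces A's O(n^2) Pascal table and O(n^2) double scan by O(n) closed-form
-- row-n binomials and, per row count i, solving the column count j directly from
-- the linear equation i*n + j*n - i*j = k.

-- ===== PORT A =====
def paintingPlan (n : Int) (k : Int) : Int :=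
  -- C = [[1]*(n+1) for _ in range(n+1)]  ([1]*(n+1): replicate with clamp at 0, exactly Python's list repetition)
  let C0 : List (List Int) := (PySem.List.pyRange 0 (n+1)).map (fun _ => List.replicate (n+1).toNat (1:Int))
  -- for i in range(1, n): for j in range(i): C[i+1][j+1] = C[i][j] + C[i][j+1]
  -- (item assignment at an always-in-range nonnegative index, ported as List.set; reads via pyGetD, always in range)
  let C := (PySem.List.pyRange 1 n).foldl (fun C i =>
      (PySem.List.pyRange 0 i).foldl (fun C j =>
        let v := PySem.List.pyGetD (PySem.List.pyGetD C i []) j 0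
               + PySem.List.pyGetD (PySem.List.pyGetD C i []) (j+1) 0
        C.set (i+1).toNat ((PySem.List.pyGetD C (i+1) []).set (j+1).toNat v)) C) C0
  let res : Int := 0
  if k = n * n then 1
  else
    (PySem.List.pyRange 0 (n+1)).foldl (fun res i =>
      (PySem.List.pyRange 0 (n+1)).foldl (fun res j =>
        if i*n + j*n - i*j = k then
          res + PySem.List.pyGetD (PySem.List.pyGetD C n []) i 0
              * PySem.List.pyGetD (PySem.List.pyGetD C n []) j 0
        else res) res) res

-- ===== PORT B =====
def paintingPlan_alt (n : Int) (k : Int) : Int :=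
  if k = n * n then 1
  else
    -- row-n binomials: C.append(C[-1] * (n - i) // (i + 1)) for i in range(n)
    let C : List Int := (PySem.List.pyRange 0 n).foldl
      (fun C i => C ++ [PySem.Int.floordiv (PySem.List.pyGetD C (-1) 0 * (n - i)) (i + 1)]) [1]
    (PySem.List.pyRange 0 n).foldl (fun res i =>
      let d := n - i
      let num := k - i * n
      if PySem.Int.mod num d = 0 then
        let j := PySem.Int.floordiv num d
        if 0 ≤ j ∧ j ≤ n then res + PySem.List.pyGetD C i 0 * PySem.List.pyGetD C j 0
        else res
      else res) 0

-- ===== PRECONDITION & SPEC =====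
def Spec_paintingPlan (n : Int) (k : Int) (out : Int) : Prop := out = paintingPlan_alt n k
instance (n : Int) (k : Int) (out : Int) : Decidable (Spec_paintingPlan n k out) := by unfold Spec_paintingPlan; infer_instance

-- ===== CLAIM (what is proved, stated in full; the proofs are below) =====
def Claim_equal_paintingPlan : Prop := ∀ (n : Int) (k : Int), Dom_paintingPlan n k → Spec_paintingPlan n k (paintingPlan n k)

-- ===== LEMMAS AND PROOFS =====

-- Pascal-table model of A's mutable table C: after the first m outer iterations,
-- row r holds binomials at positions p ≤ r for all r ≤ m+1, and 1 everywhere else.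
def pvEnt (m r p : Nat) : Int := if r ≤ m + 1 ∧ p ≤ r then (r.choose p : Int) else 1
def pvTbl (N m : Nat) : List (List Int) := (List.range (N+1)).map (fun r => (List.range (N+1)).map (pvEnt m r))
-- mid-inner-loop model: outer iteration i has filled positions 1..t of row i+1
def pvEntI (i t r p : Nat) : Int :=
  if r ≤ i ∧ p ≤ r then (r.choose p : Int)
  else if r = i + 1 ∧ 1 ≤ p ∧ p ≤ t then (r.choose p : Int) else 1
def pvTblI (N i t : Nat) : List (List Int) := (List.range (N+1)).map (fun r => (List.range (N+1)).map (pvEntI i t r))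

theorem pv_set_map_range {β : Type} (f : Nat → β) (L i : Nat) (v : β) :
    ((List.range L).map f).set i v = (List.range L).map (fun x => if x = i then v else f x) := by
  apply List.ext_getElem
  · simp
  · intro j h1 h2
    simp only [List.length_set, List.length_map, List.length_range] at h1
    rw [List.getElem_set]
    simp only [List.getElem_map, List.getElem_range]
    split_ifs with h h' h' <;> first | rfl | omega

-- A's inner-loop body (proof-side name for the port's lambda; definitionally equal)
def pvAin (i : Int) : List (List Int) → Int → List (List Int) := fun C j =>
  let v := PySem.List.pyGetD (PySem.List.pyGetD C i []) j 0
         + PySem.List.pyGetD (PySem.List.pyGetD C i []) (j+1) 0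
  C.set (i+1).toNat ((PySem.List.pyGetD C (i+1) []).set (j+1).toNat v)

-- B's binomial row
def pvBrow (N : Nat) : List Int := (List.range (N+1)).map (fun x => ((N.choose x : Nat) : Int))

theorem pv_getD_tblI (N i t r : Nat) (hr : r ≤ N) :
    PySem.List.pyGetD (pvTblI N i t) (r:Int) [] = (List.range (N+1)).map (pvEntI i t r) := by
  rw [PySem.List.pyGetD_of_nonneg _ _ (by positivity)]
  simp only [Int.toNat_natCast, pvTblI]
  exact PySem.List.getD_map_range _ _ _ _ (by omega)

theorem pv_getD_row (f : Nat → Int) (N p : Nat) (hp : p ≤ N) :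
    PySem.List.pyGetD ((List.range (N+1)).map f) (p:Int) 0 = f p := by
  rw [PySem.List.pyGetD_of_nonneg _ _ (by positivity)]
  simp only [Int.toNat_natCast]
  exact PySem.List.getD_map_range _ _ _ _ (by omega)

theorem pv_stepA (N i s : Nat) (_h1 : 1 ≤ i) (h2 : i + 1 ≤ N) (hs : s < i) :
    pvAin (i:Int) (pvTblI N i s) (s:Int) = pvTblI N i (s+1) := by
  unfold pvAin
  simp only []
  have hcast : ((i:Int) + 1) = (((i+1 : Nat)):Int) := by push_cast; ring
  have hcast2 : ((s:Int) + 1) = (((s+1 : Nat)):Int) := by push_cast; ring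
  rw [hcast, hcast2, pv_getD_tblI N i s i (by omega), pv_getD_tblI N i s (i+1) (by omega),
      pv_getD_row _ _ _ (by omega), pv_getD_row _ _ _ (by omega)]
  have hv : pvEntI i s i s + pvEntI i s i (s+1) = ((i+1).choose (s+1) : Int) := by
    unfold pvEntI
    rw [if_pos ⟨le_refl i, by omega⟩, if_pos ⟨le_refl i, by omega⟩]
    rw [Nat.choose_succ_succ]
    push_cast; ring
  rw [hv, Int.toNat_natCast, Int.toNat_natCast, pv_set_map_range]
  unfold pvTblI
  rw [pv_set_map_range]
  apply List.map_congr_left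
  intro r hr
  rw [List.mem_range] at hr
  by_cases hri : r = i + 1
  · rw [if_pos (by omega), hri]
    apply List.map_congr_left
    intro p hp
    rw [List.mem_range] at hp
    by_cases hps : p = s + 1
    · rw [if_pos (by omega), hps]
      unfold pvEntI
      rw [if_neg (by omega), if_pos ⟨rfl, by omega, le_refl _⟩]
    · rw [if_neg (by omega)]
      unfold pvEntI
      split_ifs <;> first | rfl | omega
  · rw [if_neg (by omega)]
    apply List.map_congr_left
    intro p _
    unfold pvEntI
    split_ifs <;> first | rfl | omega

theorem pv_innerA (N i : Nat) (h1 : 1 ≤ i) (h2 : i + 1 ≤ N) :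
    (PySem.List.pyRange 0 (i:Int)).foldl (pvAin (i:Int)) (pvTblI N i 0) = pvTblI N i i := by
  rw [PySem.List.pyRange_zero_natCast, List.foldl_map]
  have aux : ∀ t, t ≤ i →
      (List.range t).foldl (fun C (s : Nat) => pvAin (i:Int) C (s:Int)) (pvTblI N i 0) = pvTblI N i t := by
    intro t
    induction t with
    | zero => intro _; simp
    | succ t ih =>
      intro ht
      rw [List.range_succ, List.foldl_append, ih (by omega)]
      simp only [List.foldl_cons, List.foldl_nil]
      exact pv_stepA N i t h1 h2 (by omega)
  exact aux i (le_refl i)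

theorem pv_tbl0_eq (N i : Nat) (h1 : 1 ≤ i) : pvTbl N (i-1) = pvTblI N i 0 := by
  unfold pvTbl pvTblI
  apply List.map_congr_left; intro r _
  apply List.map_congr_left; intro p _
  unfold pvEnt pvEntI
  split_ifs <;> first | rfl | omega

theorem pv_tblI_done (N i : Nat) (_h2 : i + 1 ≤ N) : pvTblI N i i = pvTbl N i := by
  unfold pvTbl pvTblI
  apply List.map_congr_left; intro r _
  apply List.map_congr_left; intro p _
  unfold pvEnt pvEntI
  by_cases ha : r ≤ i ∧ p ≤ r
  · rw [if_pos ha, if_pos ⟨by omega, ha.2⟩]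
  · rw [if_neg ha]
    by_cases hb : r = i + 1 ∧ 1 ≤ p ∧ p ≤ i
    · rw [if_pos hb, if_pos ⟨by omega, by omega⟩]
    · rw [if_neg hb]
      by_cases hc : r ≤ i + 1 ∧ p ≤ r
      · rw [if_pos hc]
        have hpr : p = 0 ∨ p = r := by omega
        rcases hpr with h | h <;> simp [h, Nat.choose_self]
      · rw [if_neg hc]

theorem pv_tableA (N : Nat) (hN : 1 ≤ N) :
    (PySem.List.pyRange 1 (N:Int)).foldl
      (fun C i => (PySem.List.pyRange 0 i).foldl (pvAin i) C) (pvTbl N 0) = pvTbl N (N-1) := by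
  have hr : PySem.List.pyRange 1 (N:Int) = (List.range (N-1)).map (fun (t : Nat) => ((1:Int) + (t:Int))) := by
    rw [PySem.List.pyRange_of_pos _ _ (by norm_num)]
    have h1 : (((N:Int) - 1 + 1 - 1) / 1) = (N:Int) - 1 := by norm_num
    have h2 : (if (1:Int) < (N:Int) then (((N:Int) - 1 + 1 - 1) / 1).toNat else 0) = N - 1 := by
      rw [h1]; split_ifs <;> omega
    rw [h2]
    apply List.map_congr_left
    intro t _; ring
  rw [hr, List.foldl_map]
  have aux : ∀ m, m ≤ N - 1 →
      (List.range m).foldl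
        (fun C (t : Nat) => (PySem.List.pyRange 0 ((1:Int) + t)).foldl (pvAin ((1:Int) + t)) C)
        (pvTbl N 0) = pvTbl N m := by
    intro m
    induction m with
    | zero => intro _; simp
    | succ m ih =>
      intro hm
      rw [List.range_succ, List.foldl_append, ih (by omega)]
      simp only [List.foldl_cons, List.foldl_nil]
      have hc : ((1:Int) + m) = (((m+1 : Nat)):Int) := by push_cast; ring
      rw [hc]
      have h0 : pvTbl N m = pvTblI N (m+1) 0 := by
        have := pv_tbl0_eq N (m+1) (by omega)
        simpa using this
      rw [h0, pv_innerA N (m+1) (by omega) (by omega), pv_tblI_done N (m+1) (by omega)]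
  exact aux (N-1) (le_refl _)

theorem pv_C0 (N : Nat) :
    (PySem.List.pyRange 0 ((N:Int)+1)).map (fun _ => List.replicate ((N:Int)+1).toNat (1:Int))
      = pvTbl N 0 := by
  have hc : ((N:Int) + 1) = (((N+1 : Nat)):Int) := by push_cast; ring
  rw [hc, PySem.List.pyRange_zero_natCast, List.map_map, Int.toNat_natCast]
  unfold pvTbl
  apply List.map_congr_left
  intro r _
  have : List.replicate (N+1) (1:Int) = (List.range (N+1)).map (fun _ => (1:Int)) := by
    rw [List.map_const', List.length_range]
  rw [Function.comp_apply, this]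
  apply List.map_congr_left
  intro p hp
  unfold pvEnt
  split_ifs with h
  · obtain ⟨h1, h2⟩ := h
    interval_cases r <;> interval_cases p <;> rfl
  · rfl

theorem pv_getD_tbl (N m r : Nat) (hr : r ≤ N) :
    PySem.List.pyGetD (pvTbl N m) (r:Int) [] = (List.range (N+1)).map (pvEnt m r) := by
  rw [PySem.List.pyGetD_of_nonneg _ _ (by positivity)]
  simp only [Int.toNat_natCast, pvTbl]
  exact PySem.List.getD_map_range _ _ _ _ (by omega)

theorem pv_row_n (N p : Nat) (hN : 1 ≤ N) (hp : p ≤ N) :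
    PySem.List.pyGetD (PySem.List.pyGetD (pvTbl N (N-1)) (N:Int) []) (p:Int) 0
      = ((N.choose p : Nat) : Int) := by
  rw [pv_getD_tbl N (N-1) N (le_refl N), pv_getD_row _ _ _ hp]
  unfold pvEnt
  rw [if_pos ⟨by omega, hp⟩]

theorem pv_getD_neg_one (f : Nat → Int) (L : Nat) (h : 1 ≤ L) :
    PySem.List.pyGetD ((List.range L).map f) (-1) 0 = f (L-1) := by
  unfold PySem.List.pyGetD PySem.List.pyGet? PySem.List.pyIdx?
  rw [List.length_map, List.length_range]
  rw [if_neg (by omega), if_pos (by omega)]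
  have h1 : ((-(-1:Int)).toNat) = 1 := by norm_num
  rw [h1]
  show ((List.map f (List.range L))[L-1]?).getD 0 = f (L-1)
  rw [List.getElem?_map, List.getElem?_range (by omega)]
  rfl

theorem pv_binoms (N : Nat) :
    (PySem.List.pyRange 0 (N:Int)).foldl
      (fun C i => C ++ [PySem.Int.floordiv (PySem.List.pyGetD C (-1) 0 * ((N:Int) - i)) (i + 1)]) [1]
      = pvBrow N := by
  rw [PySem.List.pyRange_zero_natCast, List.foldl_map]
  have aux : ∀ t, t ≤ N →
      (List.range t).foldl
        (fun C (iN : Nat) =>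
          C ++ [PySem.Int.floordiv (PySem.List.pyGetD C (-1) 0 * ((N:Int) - iN)) ((iN:Int) + 1)]) [1]
        = (List.range (t+1)).map (fun x => ((N.choose x : Nat) : Int)) := by
    intro t
    induction t with
    | zero => simp
    | succ t ih =>
      intro ht
      rw [List.range_succ, List.foldl_append, ih (by omega)]
      simp only [List.foldl_cons, List.foldl_nil]
      rw [pv_getD_neg_one _ _ (by omega)]
      simp only [Nat.add_sub_cancel]
      have hdiv : PySem.Int.floordiv (((N.choose t : Nat) : Int) * ((N:Int) - t)) ((t:Int) + 1)
          = ((N.choose (t+1) : Nat) : Int) := by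
        have hkey : ((N.choose t : Nat) : Int) * ((N:Int) - t)
            = ((N.choose (t+1) : Nat) : Int) * ((t:Int) + 1) := by
          have h := Nat.choose_succ_right_eq N t
          have hNt : ((N:Int) - t) = (((N - t : Nat)):Int) := by omega
          have h2 : ((N.choose t * (N - t) : Nat) : Int)
              = ((N.choose (t+1) * (t+1) : Nat) : Int) := by exact_mod_cast congrArg Nat.cast h.symm
          push_cast at h2
          rw [hNt]
          linarith
        rw [PySem.Int.floordiv_eq_ediv_of_pos (by positivity), hkey,
            Int.mul_ediv_cancel _ (by positivity)]
      rw [hdiv]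
      rw [show List.range (t+1+1) = List.range (t+1) ++ [t+1] from List.range_succ, List.map_append]
      simp
  exact aux N (le_refl N)

theorem pv_foldl_ifadd {α : Type} (l : List α) (P : α → Prop) [DecidablePred P] (g : α → Int) (init : Int) :
    l.foldl (fun r x => if P x then r + g x else r) init
      = init + (l.map (fun x => if P x then g x else 0)).sum := by
  have h : (fun (r : Int) (x : α) => if P x then r + g x else r)
      = (fun r x => r + if P x then g x else 0) := by
    funext r x; split_ifs <;> simp
  rw [h, PySem.List.foldl_add]

theorem pv_sum_point (L : Nat) (q : Int) (f : Nat → Int) :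
    ((List.range L).map (fun (j : Nat) => if (j:Int) = q then f j else 0)).sum
      = if 0 ≤ q ∧ q < (L:Int) then f q.toNat else 0 := by
  induction L with
  | zero => simp
  | succ L ih =>
    rw [List.range_succ, List.map_append, List.sum_append, ih]
    simp only [List.map_cons, List.map_nil, List.sum_cons, List.sum_nil]
    by_cases hq : (L:Int) = q
    · rw [if_pos hq, if_neg (by omega), if_pos (by omega)]
      simp [← hq]
    · rw [if_neg hq]
      by_cases h2 : 0 ≤ q ∧ q < (L:Int)
      · rw [if_pos h2, if_pos (by omega)]; ring
      · rw [if_neg h2, if_neg (by omega)]; ring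

theorem pv_sums (N : Nat) (_hN : 1 ≤ N) (k : Int) (hk : ¬ k = (N:Int) * (N:Int))
    (bA bB : Int → Int)
    (hA : ∀ p : Nat, p ≤ N → bA (p:Int) = ((N.choose p : Nat) : Int))
    (hB : ∀ p : Nat, p ≤ N → bB (p:Int) = ((N.choose p : Nat) : Int)) :
    List.foldl (fun res i =>
      List.foldl (fun res j =>
        if i * (N:Int) + j * (N:Int) - i * j = k then res + bA i * bA j else res)
        res (PySem.List.pyRange 0 ((N:Int)+1))) 0 (PySem.List.pyRange 0 ((N:Int)+1))
    = List.foldl (fun res i =>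
        if PySem.Int.mod (k - i * (N:Int)) ((N:Int) - i) = 0 then
          if 0 ≤ PySem.Int.floordiv (k - i * (N:Int)) ((N:Int) - i) ∧
              PySem.Int.floordiv (k - i * (N:Int)) ((N:Int) - i) ≤ (N:Int) then
            res + bB i * bB (PySem.Int.floordiv (k - i * (N:Int)) ((N:Int) - i))
          else res
        else res) 0 (PySem.List.pyRange 0 (N:Int)) := by
  rw [show (fun (res i : Int) =>
        List.foldl (fun res j =>
          if i * (N:Int) + j * (N:Int) - i * j = k then res + bA i * bA j else res) res
          (PySem.List.pyRange 0 ((N:Int)+1)))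
      = (fun (res i : Int) => res + ((PySem.List.pyRange 0 ((N:Int)+1)).map
          (fun j => if i * (N:Int) + j * (N:Int) - i * j = k then bA i * bA j else 0)).sum)
      from funext fun res => funext fun i => pv_foldl_ifadd _ _ _ _,
      PySem.List.foldl_add]
  rw [show (fun (res i : Int) =>
        if PySem.Int.mod (k - i * (N:Int)) ((N:Int) - i) = 0 then
          if 0 ≤ PySem.Int.floordiv (k - i * (N:Int)) ((N:Int) - i) ∧
              PySem.Int.floordiv (k - i * (N:Int)) ((N:Int) - i) ≤ (N:Int) then
            res + bB i * bB (PySem.Int.floordiv (k - i * (N:Int)) ((N:Int) - i))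
          else res
        else res)
      = (fun (res i : Int) => res +
          (if PySem.Int.mod (k - i * (N:Int)) ((N:Int) - i) = 0 then
            if 0 ≤ PySem.Int.floordiv (k - i * (N:Int)) ((N:Int) - i) ∧
                PySem.Int.floordiv (k - i * (N:Int)) ((N:Int) - i) ≤ (N:Int) then
              bB i * bB (PySem.Int.floordiv (k - i * (N:Int)) ((N:Int) - i))
            else 0 else 0))
      from funext fun res => funext fun i => by split_ifs <;> ring,
      PySem.List.foldl_add]
  rw [show ((N:Int)+1) = (((N+1:Nat)):Int) from by push_cast; ring]
  rw [PySem.List.pyRange_zero_natCast, PySem.List.pyRange_zero_natCast, List.map_map, List.map_map]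
  simp only [zero_add]
  have hsplit : ∀ F : Int → Int,
      (List.map (F ∘ (fun (x:Nat) => (x:Int))) (List.range (N+1))).sum
        = (List.map (F ∘ (fun (x:Nat) => (x:Int))) (List.range N)).sum + F ((N:Nat):Int) := by
    intro F
    rw [List.range_succ, List.map_append, List.sum_append]
    simp
  rw [hsplit]
  have hSN : (List.map (fun j => if (N:Int) * ↑N + j * ↑N - ↑N * j = k then bA ↑N * bA j else 0)
      ((List.range (N+1)).map (fun (x:Nat) => (x:Int)))).sum = 0 := by
    apply List.sum_eq_zero
    intro x hx
    rw [List.mem_map] at hx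
    obtain ⟨j, _, rfl⟩ := hx
    rw [if_neg]
    intro h
    apply hk
    have hc : (j:Int) * ↑N = ↑N * j := mul_comm _ _
    linarith
  rw [hSN, add_zero]
  apply congrArg List.sum
  apply List.map_congr_left
  intro iN hiN
  rw [List.mem_range] at hiN
  rw [Function.comp_apply, Function.comp_apply, List.map_map]
  have hd0 : (0:Int) < ↑N - ↑iN := by omega
  by_cases hdvd : ((N:Int) - ↑iN) ∣ (k - ↑iN * ↑N)
  · obtain ⟨c, hc⟩ := hdvd
    have hdiv : PySem.Int.floordiv (k - ↑iN * ↑N) ((N:Int) - ↑iN) = c := by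
      rw [PySem.Int.floordiv_eq_ediv_of_pos hd0, hc, Int.mul_ediv_cancel_left _ (by omega)]
    rw [if_pos (by rw [PySem.Int.mod_eq_zero_iff_dvd]; exact ⟨c, hc⟩), hdiv]
    have hmap : List.map ((fun j => if ↑iN * ↑N + j * ↑N - ↑iN * j = k then bA ↑iN * bA j else 0)
          ∘ (fun (x:Nat) => (x:Int))) (List.range (N+1))
        = List.map (fun (j : Nat) => if ((j:Nat):Int) = c then
            ((N.choose iN : Nat):Int) * ((N.choose j : Nat):Int) else 0) (List.range (N+1)) := by
      apply List.map_congr_left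
      intro j hj
      rw [List.mem_range] at hj
      rw [Function.comp_apply]
      have hiff : ((iN:Int) * ↑N + ↑j * ↑N - ↑iN * ↑j = k) ↔ ((j:Int) = c) := by
        constructor
        · intro h
          have e1 : ((N:Int) - ↑iN) * ↑j = k - ↑iN * ↑N := by linear_combination h
          rw [hc] at e1
          exact mul_left_cancel₀ (by omega) e1
        · intro h
          linear_combination ((N:Int) - ↑iN) * h - hc
      rw [if_congr hiff (by rw [hA iN (by omega), hA j (by omega)]) rfl]
    rw [hmap, pv_sum_point (N+1) c (fun j => ((N.choose iN : Nat):Int) * ((N.choose j : Nat):Int))]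
    by_cases hcr : 0 ≤ c ∧ c ≤ (N:Int)
    · rw [if_pos (show 0 ≤ c ∧ c < (((N+1:Nat)):Int) by constructor; exact hcr.1; push_cast; omega),
          if_pos hcr, hB iN (by omega)]
      have hbc : bB c = ((N.choose c.toNat : Nat) : Int) := by
        rw [show c = ((c.toNat : Nat) : Int) from by omega, hB c.toNat (by omega), Int.toNat_natCast]
      rw [hbc]
    · rw [if_neg (by intro hh; exact hcr ⟨hh.1, by push_cast at hh; omega⟩), if_neg hcr]
  · rw [if_neg (by rw [PySem.Int.mod_eq_zero_iff_dvd]; exact hdvd)]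
    apply List.sum_eq_zero
    intro x hx
    rw [List.mem_map] at hx
    obtain ⟨j, _, rfl⟩ := hx
    rw [Function.comp_apply, if_neg]
    intro h
    apply hdvd
    refine ⟨(j:Int), ?_⟩
    linear_combination -h

theorem paintingPlan_eq (n k : Int) : paintingPlan n k = paintingPlan_alt n k := by
  simp only [paintingPlan, paintingPlan_alt]
  by_cases hk : k = n * n
  · rw [if_pos hk, if_pos hk]
  · rw [if_neg hk, if_neg hk]
    have hempty : ∀ b : Int, b ≤ 0 → PySem.List.pyRange 0 b = ([] : List Int) := by
      intro b hb
      rw [PySem.List.pyRange_of_pos _ _ one_pos, if_neg (by omega)]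
      simp
    have hempty1 : ∀ b : Int, b ≤ 1 → PySem.List.pyRange 1 b = ([] : List Int) := by
      intro b hb
      rw [PySem.List.pyRange_of_pos _ _ one_pos, if_neg (by omega)]
      simp
    rcases lt_trichotomy n 0 with hn | hn | hn
    · rw [hempty (n+1) (by omega), hempty n (by omega)]
      simp
    · subst hn
      rw [hempty 0 le_rfl, show PySem.List.pyRange 0 (0+1) = [0] from rfl]
      simp [List.foldl]
      omega
    · -- main case: n ≥ 1
      obtain ⟨N, rfl⟩ : ∃ N : Nat, n = (N:Int) := ⟨n.toNat, (Int.toNat_of_nonneg (by omega)).symm⟩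
      have hN : 1 ≤ N := by exact_mod_cast hn
      rw [pv_C0 N]
      rw [show (fun (C : List (List Int)) (i : Int) =>
            List.foldl
              (fun (C : List (List Int)) (j : Int) =>
                C.set (i + 1).toNat
                  ((PySem.List.pyGetD C (i + 1) []).set (j + 1).toNat
                    (PySem.List.pyGetD (PySem.List.pyGetD C i []) j 0 +
                      PySem.List.pyGetD (PySem.List.pyGetD C i []) (j + 1) 0)))
              C (PySem.List.pyRange 0 i))
          = (fun (C : List (List Int)) (i : Int) => (PySem.List.pyRange 0 i).foldl (pvAin i) C) from rfl]
      rw [pv_tableA N hN, pv_binoms N]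
      exact pv_sums N hN k hk
        (fun x => PySem.List.pyGetD (PySem.List.pyGetD (pvTbl N (N-1)) (N:Int) []) x 0)
        (fun x => PySem.List.pyGetD (pvBrow N) x 0)
        (fun p hp => pv_row_n N p hN hp)
        (fun p hp => pv_getD_row _ _ _ hp)

-- ===== VERDICT (by name: the statement is the Claim_ definition above) =====
theorem paintingPlan_spec : Claim_equal_paintingPlan := by
  intro n k _
  unfold Spec_paintingPlan
  exact paintingPlan_eq n k
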